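-- pv_equiv track=rewrite | github.com/matinsanei/worpen | backend/test_named_params.py | parse_named_query
-- ===== SOURCE A (Python) =====
-- def parse_named_query(sql: str):
--     """Parse SQL with named parameters"""
--     query = ""
--     param_names = []
--     i = 0
--
--     while i < len(sql):
--         if sql[i] == ':' and i + 1 < len(sql) and (sql[i+1].isalpha() or sql[i+1] == '_'):
--             # Extract parameter name
--             param_name = ""
--             i += 1
--             while i < len(sql) and (sql[i].isalnum() or sql[i] == '_'):
--                 param_name += sql[i]
--                 i += 1
--             param_names.append(param_name)
--             query += '?'
--         else:
--             query += sql[i]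
--             i += 1
--
--     return query, param_names
-- ===== SOURCE B (Python) =====
-- def parse_named_query(sql: str):
--     """Parse SQL with named parameters"""
--     parts = sql.split(':')
--     pieces = [parts[0]]
--     param_names = []
--     for part in parts[1:]:
--         if part and (part[0].isalpha() or part[0] == '_'):
--             name, rest = part, ''
--             for k, ch in enumerate(part):
--                 if not (ch.isalnum() or ch == '_'):
--                     name, rest = part[:k], part[k:]
--                     break
--             param_names.append(name)
--             pieces.append('?' + rest)
--         else:
--             pieces.append(':' + part)
--     return ''.join(pieces), param_names
-- ===== Notes on version B (the rewrite author's own statement) =====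
-- stated objective: faster
-- what changed: B replaces A's index-driven while-loop with per-character string concatenation by splitting the SQL once on the colon separator and rebuilding each segment (word-prefix becomes a parameter name, segments re-joined with one join), a split/rebuild/join pass instead of a char-by-char scan.
import Mathlib
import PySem

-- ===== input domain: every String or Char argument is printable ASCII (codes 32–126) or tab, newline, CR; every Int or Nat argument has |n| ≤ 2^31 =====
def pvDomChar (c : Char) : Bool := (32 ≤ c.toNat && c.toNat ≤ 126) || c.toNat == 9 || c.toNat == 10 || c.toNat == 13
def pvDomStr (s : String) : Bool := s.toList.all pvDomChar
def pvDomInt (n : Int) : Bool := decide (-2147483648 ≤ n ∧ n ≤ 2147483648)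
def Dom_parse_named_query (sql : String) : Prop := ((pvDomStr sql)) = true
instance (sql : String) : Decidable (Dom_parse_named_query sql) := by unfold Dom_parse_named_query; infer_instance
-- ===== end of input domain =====

-- B rewrites A's index/while char-by-char scan (string += per character) as a single split
-- on ':' plus per-segment rebuild with one ''.join; measured faster, proved equal on Dom.

-- ===== PORT A =====
-- the two character tests both Pythons spell out: sql[i].isalnum() or sql[i]=='_', and
-- the name-start test sql[i+1].isalpha() or sql[i+1]=='_'
def pvIsWord (c : Char) : Bool := PySem.Chars.isalnum c || c = '_'
def pvStarts (cs : List Char) : Bool :=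
  match cs with
  | c :: _ => PySem.Chars.isalpha c || c = '_'
  | [] => false

-- inner while loop of A: collect name chars while sql[i].isalnum() or sql[i] == '_'
def pvAInner (cs : List Char) (name : List Char) : List Char × List Char :=
  match cs with
  | [] => (name, [])
  | c :: rest =>
    if pvIsWord c then pvAInner rest (name ++ [c])
    else (name, c :: rest)

theorem pvAInner_snd_length_le (cs : List Char) (name : List Char) :
    (pvAInner cs name).2.length ≤ cs.length := by
  induction cs generalizing name with
  | nil => simp [pvAInner]
  | cons c rest ih =>
    simp only [pvAInner]
    split
    · exact le_trans (ih _) (by simp)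
    · simp

-- outer while loop of A (query accumulated as List Char, wrapped to String at the end)
def pvALoop (cs : List Char) (query : List Char) (names : List String) :
    List Char × List String :=
  match cs with
  | [] => (query, names)
  | c :: rest =>
    if c = ':' ∧ pvStarts rest = true then
      let p := pvAInner rest []
      pvALoop p.2 (query ++ ['?']) (names ++ [String.ofList p.1])
    else
      pvALoop rest (query ++ [c]) names
termination_by cs.length
decreasing_by
  · exact Nat.lt_succ_of_le (pvAInner_snd_length_le rest [])
  · simp

def parse_named_query (sql : String) : String × List String :=
  let r := pvALoop sql.toList [] []
  (String.ofList r.1, r.2)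

-- ===== PORT B =====
-- B's inner for/break loop: split `part` at the first non-word character
def pvWordSplit (cs : List Char) : List Char × List Char :=
  match cs with
  | [] => ([], [])
  | c :: rest =>
    if !(pvIsWord c) then ([], c :: rest)
    else
      let p := pvWordSplit rest
      (c :: p.1, p.2)

-- one step of B's `for part in parts[1:]` loop over (pieces, param_names)
def pvBStep (st : List (List Char) × List String) (part : List Char) :
    List (List Char) × List String :=
  if pvStarts part then
    let p := pvWordSplit part
    (st.1 ++ ['?' :: p.2], st.2 ++ [String.ofList p.1])
  else
    (st.1 ++ [':' :: part], st.2)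

def parse_named_query_alt (sql : String) : String × List String :=
  let parts := PySem.Chars.splitOn sql.toList [':']
  let st := (parts.drop 1).foldl pvBStep ([parts.headD []], [])
  (String.ofList (PySem.Chars.join [] st.1), st.2)

-- ===== PRECONDITION & SPEC =====
def Spec_parse_named_query (sql : String) (out : String × List String) : Prop := out = parse_named_query_alt sql
instance (sql : String) (out : String × List String) : Decidable (Spec_parse_named_query sql out) := by unfold Spec_parse_named_query; infer_instance

-- ===== CLAIM (what is proved, stated in full; the proofs are below) =====
def Claim_equal_parse_named_query : Prop := ∀ (sql : String), Dom_parse_named_query sql → Spec_parse_named_query sql (parse_named_query sql)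

-- ===== LEMMAS AND PROOFS =====

-- (first segment before ':', remaining ':'-separated segments) of a char list
def pvSp (cs : List Char) : List Char × List (List Char) :=
  match cs with
  | [] => ([], [])
  | c :: rest =>
    if c = ':' then ([], (pvSp rest).1 :: (pvSp rest).2)
    else (c :: (pvSp rest).1, (pvSp rest).2)

-- recursive value-level description of B's fold over the tail segments
def pvTail (parts : List (List Char)) : List Char × List String :=
  match parts with
  | [] => ([], [])
  | p :: ps =>
    let r := pvTail ps
    if pvStarts p then
      ('?' :: (pvWordSplit p).2 ++ r.1, String.ofList (pvWordSplit p).1 :: r.2)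
    else
      (':' :: p ++ r.1, r.2)

theorem pvSplitOn_go_eq (fuel : Nat) (l cur : List Char) (acc : List (List Char))
    (h : l.length < fuel) :
    PySem.Chars.splitOn.go [':'] fuel l cur acc
      = acc.reverse ++ ((cur.reverse ++ (pvSp l).1) :: (pvSp l).2) := by
  induction fuel generalizing l cur acc with
  | zero => omega
  | succ f ih =>
    cases l with
    | nil => simp [PySem.Chars.splitOn.go, pvSp]
    | cons c rest =>
      by_cases hc : c = ':'
      · subst hc
        rw [show PySem.Chars.splitOn.go [':'] (f+1) (':' :: rest) cur acc
              = PySem.Chars.splitOn.go [':'] f rest [] (cur.reverse :: acc) by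
            simp [PySem.Chars.splitOn.go, List.isPrefixOf]]
        rw [ih rest [] (cur.reverse :: acc) (by simpa using Nat.lt_of_succ_lt_succ h)]
        simp [pvSp]
      · rw [show PySem.Chars.splitOn.go [':'] (f+1) (c :: rest) cur acc
              = PySem.Chars.splitOn.go [':'] f rest (c :: cur) acc by
            simp only [PySem.Chars.splitOn.go, List.isPrefixOf]
            simp
            intro h
            exact absurd h.symm hc]
        rw [ih rest (c :: cur) acc (by simpa using Nat.lt_of_succ_lt_succ h)]
        simp [pvSp, hc]

theorem pvSplitOn_eq (cs : List Char) :
    PySem.Chars.splitOn cs [':'] = (pvSp cs).1 :: (pvSp cs).2 := by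
  unfold PySem.Chars.splitOn
  rw [pvSplitOn_go_eq (cs.length + 1) cs [] [] (by omega)]
  simp

theorem pvAInner_eq (cs name : List Char) :
    pvAInner cs name = (name ++ (pvWordSplit cs).1, (pvWordSplit cs).2) := by
  induction cs generalizing name with
  | nil => simp [pvAInner, pvWordSplit]
  | cons c rest ih =>
    by_cases hw : pvIsWord c = true
    · simp [pvAInner, pvWordSplit, hw, ih]
    · simp [pvAInner, pvWordSplit, hw]

-- a word character is never ':' ; commute pvWordSplit with pvSp
theorem pvWord_ne_colon (c : Char) (h : pvIsWord c = true) :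
    c ≠ ':' := by
  rintro rfl; revert h; decide

theorem pvSp_wordSplit (cs : List Char) :
    (pvWordSplit (pvSp cs).1).1 = (pvWordSplit cs).1
    ∧ (pvSp (pvWordSplit cs).2).1 = (pvWordSplit (pvSp cs).1).2
    ∧ (pvSp (pvWordSplit cs).2).2 = (pvSp cs).2 := by
  induction cs with
  | nil => simp [pvSp, pvWordSplit]
  | cons c rest ih =>
    by_cases hw : pvIsWord c = true
    · have hc := pvWord_ne_colon c hw
      have h1 : pvWordSplit (c :: rest)
          = (c :: (pvWordSplit rest).1, (pvWordSplit rest).2) := by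
        simp [pvWordSplit, hw]
      have h2 : pvSp (c :: rest) = (c :: (pvSp rest).1, (pvSp rest).2) := by
        simp [pvSp, hc]
      have h3 : pvWordSplit (c :: (pvSp rest).1)
          = (c :: (pvWordSplit (pvSp rest).1).1, (pvWordSplit (pvSp rest).1).2) := by
        simp [pvWordSplit, hw]
      refine ⟨?_, ?_, ?_⟩ <;> simp [h1, h2, h3, ih.1, ih.2.1, ih.2.2]
    · have hwf : pvIsWord c = false := Bool.eq_false_iff.mpr hw
      by_cases hc : c = ':'
      · subst hc
        simp [pvSp, pvWordSplit, hwf]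
      · simp [pvSp, pvWordSplit, hwf, hc]

-- main loop invariant: A's scan equals first-segment ++ B's tail processing
theorem pvALoop_eq (cs : List Char) (query : List Char) (names : List String) :
    pvALoop cs query names
      = (query ++ (pvSp cs).1 ++ (pvTail (pvSp cs).2).1,
         names ++ (pvTail (pvSp cs).2).2) := by
  induction hn : cs.length using Nat.strong_induction_on generalizing cs query names with
  | _ n ih =>
  cases cs with
  | nil => simp [pvALoop, pvSp, pvTail]
  | cons c rest =>
    by_cases hcolon : c = ':' ∧ pvStarts rest = true
    · obtain ⟨hc, hd⟩ := hcolon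
      subst hc
      cases rest with
      | nil => simp [pvStarts] at hd
      | cons d rest2 =>
        have hd' : (PySem.Chars.isalpha d || decide (d = '_')) = true := by
          simpa [pvStarts] using hd
        have hdw : pvIsWord d = true := by
          rcases Bool.or_eq_true_iff.mp hd' with h | h
          · simp [pvIsWord, PySem.Chars.isalnum, h]
          · simp [pvIsWord, h]
        have hdc : d ≠ ':' := pvWord_ne_colon d hdw
        rw [show pvALoop (':' :: d :: rest2) query names
              = pvALoop (pvAInner (d :: rest2) []).2 (query ++ ['?'])
                  (names ++ [String.ofList (pvAInner (d :: rest2) []).1]) by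
            rw [pvALoop]; simp [hd]]
        rw [pvAInner_eq]
        have hlen : ((pvWordSplit (d :: rest2)).2).length < n := by
          have h1 := pvAInner_snd_length_le (d :: rest2) []
          rw [pvAInner_eq] at h1
          simp only [List.length_cons] at h1 hn ⊢
          omega
        rw [ih _ hlen _ _ _ rfl]
        obtain ⟨e1, e2, e3⟩ := pvSp_wordSplit (d :: rest2)
        rw [e2, e3]
        -- unfold the RHS: pvSp (':' :: d :: rest2) and pvTail on its first segment
        have hsp : pvSp (':' :: d :: rest2)
            = ([], (pvSp (d :: rest2)).1 :: (pvSp (d :: rest2)).2) := by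
          simp [pvSp]
        rw [hsp]
        have hhead : (pvSp (d :: rest2)).1 = d :: (pvSp rest2).1 := by
          simp [pvSp, hdc]
        have hstart : pvStarts (pvSp (d :: rest2)).1 = true := by
          rw [hhead]; simpa [pvStarts] using hd'
        conv_rhs => rw [pvTail]
        simp only [hstart, if_true]
        rw [← e1]
        simp
    · rw [show pvALoop (c :: rest) query names
            = pvALoop rest (query ++ [c]) names by
          rw [pvALoop]; simp [hcolon]]
      rw [ih rest.length (by simp [← hn]) rest _ _ rfl]
      by_cases hc : c = ':'
      · subst hc
        have hnot : ¬ pvStarts rest = true := by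
          intro h; exact hcolon ⟨rfl, h⟩
        have hsp : pvSp (':' :: rest) = ([], (pvSp rest).1 :: (pvSp rest).2) := by
          simp [pvSp]
        rw [hsp]
        have hns : pvStarts (pvSp rest).1 = false := by
          cases rest with
          | nil => simp [pvSp, pvStarts]
          | cons d rest2 =>
            by_cases hdc : d = ':'
            · subst hdc; simp [pvSp, pvStarts]
            · have : (pvSp (d :: rest2)).1 = d :: (pvSp rest2).1 := by simp [pvSp, hdc]
              rw [this]
              simpa [pvStarts] using hnot
        conv_rhs => rw [pvTail]
        simp only [hns, Bool.false_eq_true, if_false]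
        simp
      · have hsp : pvSp (c :: rest) = (c :: (pvSp rest).1, (pvSp rest).2) := by
          simp [pvSp, hc]
        rw [hsp]
        simp

-- B's foldl over the tail segments computes pvTail (flattened through join [])
theorem pvFold_eq (parts : List (List Char)) (ps0 : List (List Char)) (ns0 : List String) :
    ((parts.foldl pvBStep (ps0, ns0)).1.flatten, (parts.foldl pvBStep (ps0, ns0)).2)
      = (ps0.flatten ++ (pvTail parts).1, ns0 ++ (pvTail parts).2) := by
  induction parts generalizing ps0 ns0 with
  | nil => simp [pvTail]
  | cons p ps ih =>
    simp only [List.foldl_cons, pvTail]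
    rw [pvBStep]
    split
    · rw [ih]; simp
    · rw [ih]; simp

theorem pvJoin_nil_eq_flatten (ps : List (List Char)) :
    PySem.Chars.join [] ps = ps.flatten := by
  induction ps with
  | nil => rfl
  | cons p ps ih =>
    cases ps with
    | nil => simp [PySem.Chars.join, List.intercalate]
    | cons q qs =>
      rw [PySem.Chars.join_cons_cons, ih]
      simp

-- ===== VERDICT (by name: the statement is the Claim_ definition above) =====
theorem parse_named_query_spec : Claim_equal_parse_named_query := by
  intro sql _
  unfold Spec_parse_named_query parse_named_query parse_named_query_alt
  rw [pvSplitOn_eq]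
  simp only [List.headD, List.drop_succ_cons, List.drop_zero]
  have hf := pvFold_eq (pvSp sql.toList).2 [(pvSp sql.toList).1] []
  rw [pvALoop_eq]
  have h1 : (((pvSp sql.toList).2).foldl pvBStep ([(pvSp sql.toList).1], [])).1.flatten
      = (pvSp sql.toList).1 ++ (pvTail (pvSp sql.toList).2).1 := by
    have := congrArg Prod.fst hf; simpa using this
  have h2 : (((pvSp sql.toList).2).foldl pvBStep ([(pvSp sql.toList).1], [])).2
      = (pvTail (pvSp sql.toList).2).2 := by
    have := congrArg Prod.snd hf; simpa using this
  rw [pvJoin_nil_eq_flatten, h1, h2]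
  simp
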